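-- pv_equiv track=rewrite | github.com/daniel-reich/ubiquitous-fiesta | uv6NvSydCGB7jKAyu_13.py | is_parsel_tongue
-- ===== SOURCE A (Python) =====
-- def is_parsel_tongue(s):
--   lst = s.split(" ")
--   for x in lst:
--     count = 0
--     for y in range(len(x)):
--       if x[y] == 's' or x[y] == 'S':
--         count += 1
--       else:
--         if count == 1:
--           return False
--         count = 0
--   return True
-- ===== SOURCE B (Python) =====
-- def is_parsel_tongue(s):
--     prev = None
--     for a, b in zip(s, s[1:]):
--         if a in 'sS' and (prev is None or prev not in 'sS') and b not in 'sS' and b != ' ':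
--             return False
--         prev = a
--     return True
-- ===== Notes on version B (the rewrite author's own statement) =====
-- stated objective: simpler
-- what changed: Replaces A's split-into-words plus per-word s-run counter (nested loops with mutable count state) by a single sliding-window pass over the raw string: each character is checked with its predecessor and successor, failing exactly on a lone s/S whose neighbours show a run of length one not ending the word; no word list is materialised.
import Mathlib
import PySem

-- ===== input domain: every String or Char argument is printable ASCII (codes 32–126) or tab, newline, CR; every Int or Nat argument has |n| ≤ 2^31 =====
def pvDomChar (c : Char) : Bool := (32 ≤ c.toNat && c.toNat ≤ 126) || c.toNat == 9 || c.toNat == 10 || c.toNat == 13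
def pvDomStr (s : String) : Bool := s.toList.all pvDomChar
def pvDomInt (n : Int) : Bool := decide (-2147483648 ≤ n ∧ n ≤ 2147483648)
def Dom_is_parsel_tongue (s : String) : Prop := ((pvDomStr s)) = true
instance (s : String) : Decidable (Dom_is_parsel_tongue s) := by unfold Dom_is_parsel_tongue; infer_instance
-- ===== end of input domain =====

-- B replaces A's split-into-words + per-word run counter by one sliding-window pass over the
-- raw string (each char with its predecessor and successor); objective: simpler, same O(n) cost.


-- ===== PORT A =====
-- inner loop of A: scan the word's chars with the running count; False = early `return False`
def pyInner : List Char → Nat → Bool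
  | [], _ => true
  | c :: rest, count =>
    if c == 's' || c == 'S' then pyInner rest (count + 1)
    else if count == 1 then false
    else pyInner rest 0

def is_parsel_tongue (s : String) : Bool :=
  let lst := PySem.Chars.splitOn s.toList [' ']   -- s.split(" ")
  lst.all (fun x => pyInner x 0)                  -- for x in lst: … (early return False = all)

-- ===== PORT B =====
def isS (c : Char) : Bool := c == 's' || c == 'S'   -- `c in 'sS'`

-- for a, b in zip(s, s[1:]): … ; prev updated each step
def altLoop : Option Char → List Char → Bool
  | _, [] => true
  | _, [_] => true
  | prev, a :: b :: rest =>
    if isS a && (match prev with | none => true | some p => !isS p) && !isS b && !(b == ' ')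
    then false
    else altLoop (some a) (b :: rest)

def is_parsel_tongue_alt (s : String) : Bool := altLoop none s.toList

-- ===== PRECONDITION & SPEC =====
def Spec_is_parsel_tongue (s : String) (out : Bool) : Prop := out = is_parsel_tongue_alt s
instance (s : String) (out : Bool) : Decidable (Spec_is_parsel_tongue s out) := by unfold Spec_is_parsel_tongue; infer_instance

-- ===== CLAIM (what is proved, stated in full; the proofs are below) =====
def Claim_equal_is_parsel_tongue : Prop := ∀ (s : String), Dom_is_parsel_tongue s → Spec_is_parsel_tongue s (is_parsel_tongue s)

-- ===== LEMMAS AND PROOFS =====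

-- reference split (structural recursion; words accumulated reversed in cur)
def mySplitWords : List Char → List Char → List (List Char)
  | [], cur => [cur.reverse]
  | c :: rest, cur => if c = ' ' then cur.reverse :: mySplitWords rest [] else mySplitWords rest (c :: cur)

-- state evaluator for A's inner scan: none = early False, some n = alive with count n
def st : List Char → Nat → Option Nat
  | [], n => some n
  | c :: rest, n =>
    if isS c then st rest (n + 1)
    else if n = 1 then none
    else st rest 0

-- fused automaton: A's whole computation as one pass over the raw chars
def g : List Char → Nat → Bool
  | [], _ => true
  | c :: rest, n =>
    if c = ' ' then g rest 0
    else if isS c then g rest (n + 1)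
    else if n = 1 then false
    else g rest 0

theorem splitOn_go_eq (fuel : Nat) (l cur : List Char) (acc : List (List Char))
    (h : l.length < fuel) :
    PySem.Chars.splitOn.go [' '] fuel l cur acc = acc.reverse ++ mySplitWords l cur := by
  induction fuel generalizing l cur acc with
  | zero => omega
  | succ f ih =>
    cases l with
    | nil => simp [PySem.Chars.splitOn.go, mySplitWords]
    | cons c rest =>
      by_cases hc : c = ' '
      · subst hc
        have hpre : [' '].isPrefixOf (' ' :: rest) = true := by simp [List.isPrefixOf]
        simp only [PySem.Chars.splitOn.go, hpre, if_pos, List.length_cons, List.length_nil,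
          List.drop_succ_cons, List.drop_zero]
        rw [ih rest [] (List.reverse cur :: acc) (by simpa using Nat.lt_of_succ_lt_succ h)]
        simp [mySplitWords]
      · have hpre : [' '].isPrefixOf (c :: rest) = false := by
          simp only [List.isPrefixOf, Bool.and_eq_false_iff, beq_eq_false_iff_ne]
          exact Or.inl fun h => hc h.symm
        simp only [PySem.Chars.splitOn.go, hpre]
        rw [if_neg (by simp)]
        rw [ih rest (c :: cur) acc (by simpa using Nat.lt_of_succ_lt_succ h)]
        simp [mySplitWords, hc]

theorem splitOn_eq (l : List Char) :
    PySem.Chars.splitOn l [' '] = mySplitWords l [] := by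
  have := splitOn_go_eq (l.length + 1) l [] [] (by omega)
  simpa [PySem.Chars.splitOn] using this

theorem pyInner_eq_st (l : List Char) (n : Nat) : pyInner l n = (st l n).isSome := by
  induction l generalizing n with
  | nil => simp [pyInner, st]
  | cons c rest ih =>
    simp only [pyInner, st, isS]
    by_cases h : (c == 's' || c == 'S') = true
    · simp [h, ih]
    · simp only [Bool.not_eq_true] at h
      by_cases hn : n = 1 <;> simp [h, hn, ih]

theorem st_append (u v : List Char) (n : Nat) :
    st (u ++ v) n = (st u n).bind (st v) := by
  induction u generalizing n with
  | nil => simp [st]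
  | cons c rest ih =>
    simp only [List.cons_append, st]
    by_cases h : isS c = true
    · simp [h, ih]
    · by_cases hn : n = 1 <;> simp [h, hn, ih]

-- A's word-by-word run equals the fused automaton after the already-accumulated prefix
theorem all_mySplitWords_eq_g (l cur : List Char) :
    (mySplitWords l cur).all (fun w => pyInner w 0)
      = match st cur.reverse 0 with
        | none => false
        | some n => g l n := by
  induction l generalizing cur with
  | nil =>
    simp only [mySplitWords, List.all_cons, List.all_nil, Bool.and_true, pyInner_eq_st]
    cases st cur.reverse 0 <;> simp [g]
  | cons c rest ih =>
    by_cases hc : c = ' '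
    · subst hc
      rw [show mySplitWords (' ' :: rest) cur = cur.reverse :: mySplitWords rest [] from by
        simp [mySplitWords]]
      rw [List.all_cons, ih]
      simp only [pyInner_eq_st, List.reverse_nil, st]
      cases st cur.reverse 0 <;> simp [g]
    · simp only [mySplitWords, if_neg hc]
      rw [ih]
      have hrev : (c :: cur).reverse = cur.reverse ++ [c] := by simp
      rw [hrev, st_append]
      cases hst : st cur.reverse 0 with
      | none => simp
      | some n =>
        simp only [Option.bind_some, st]
        by_cases hs : isS c = true
        · simp [hs, g, hc]
        · by_cases hn : n = 1
          · simp [hs, hn, g, hc]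
          · simp [hs, hn, g, hc]

-- invariant tying B's (prev, lookahead) window to A's run counter n
def StInv (p : Option Char) (n : Nat) (l : List Char) : Prop :=
  (n = 0 → (p = none ∨ ∃ c, p = some c ∧ isS c = false)) ∧
  (1 ≤ n → ∃ c, p = some c ∧ isS c = true) ∧
  (n = 1 → ∀ b, l.head? = some b → (isS b = true ∨ b = ' '))

def prevOk : Option Char → Bool
  | none => true
  | some q => !isS q

theorem g_eq_altLoop (l : List Char) (p : Option Char) (n : Nat) (hinv : StInv p n l) :
    g l n = altLoop p l := by
  induction l generalizing p n with
  | nil => rfl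
  | cons a rest ih =>
    obtain ⟨h0, h1, hlook⟩ := hinv
    cases rest with
    | nil =>
      -- single remaining char: B does nothing; A can only fail on n = 1 with a bad char,
      -- which the invariant excludes
      by_cases ha : a = ' '
      · simp [g, altLoop, ha]
      · by_cases hs : isS a = true
        · simp [g, altLoop, ha, hs]
        · have hn1 : n ≠ 1 := by
            intro hn
            rcases hlook hn a rfl with h | h
            · exact absurd h hs
            · exact absurd h ha
          simp [g, altLoop, ha, hs, hn1]
    | cons b rest' =>
      have hgstep : g (a :: b :: rest') n =
          (if a = ' ' then g (b :: rest') 0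
           else if isS a then g (b :: rest') (n + 1)
           else if n = 1 then false else g (b :: rest') 0) := rfl
      have hastep : altLoop p (a :: b :: rest') =
          (if isS a && prevOk p && !isS b && !(b == ' ')
           then false else altLoop (some a) (b :: rest')) := rfl
      rw [hgstep, hastep]
      by_cases ha : a = ' '
      · have hsa : isS a = false := by simp [isS, ha]
        rw [if_pos ha, if_neg (by simp [hsa])]
        exact ih (some a) 0 ⟨fun _ => Or.inr ⟨a, rfl, hsa⟩, fun h => absurd h (by decide),
          fun h => absurd h (by decide)⟩
      · by_cases hs : isS a = true
        · rw [if_neg ha, if_pos hs]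
          have hmatch : prevOk p = decide (n = 0) := by
            by_cases hn : n = 0
            · rcases h0 hn with hp | ⟨c, hp, hc⟩
              · subst hp; simp [prevOk, hn]
              · subst hp; simp [prevOk, hc, hn]
            · rcases h1 (by omega) with ⟨c, hp, hc⟩
              subst hp; simp [prevOk, hc, hn]
          rw [hmatch]
          by_cases hn : n = 0
          · subst hn
            by_cases hsb : isS b = true
            · rw [if_neg (by simp [hsb])]
              exact ih (some a) 1 ⟨fun h => absurd h (by decide), fun _ => ⟨a, rfl, hs⟩,
                fun _ b' hb' => by cases hb'; exact Or.inl hsb⟩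
            · by_cases hbsp : b = ' '
              · rw [if_neg (by simp [hbsp])]
                exact ih (some a) 1 ⟨fun h => absurd h (by decide), fun _ => ⟨a, rfl, hs⟩,
                  fun _ b' hb' => by cases hb'; exact Or.inr hbsp⟩
              · rw [if_pos (by simp [hs, hsb, hbsp])]
                show g (b :: rest') 1 = false
                simp [g, hsb, hbsp]
          · rw [if_neg (by simp [hn])]
            exact ih (some a) (n + 1) ⟨fun h => absurd h (by omega), fun _ => ⟨a, rfl, hs⟩,
              fun h => absurd h (by omega)⟩
        · have hn1 : n ≠ 1 := by
            intro hn
            rcases hlook hn a rfl with h | h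
            · exact absurd h hs
            · exact absurd h ha
          rw [if_neg ha, if_neg hs, if_neg hn1, if_neg (by simp [hs])]
          exact ih (some a) 0 ⟨fun _ => Or.inr ⟨a, rfl, by simpa using hs⟩,
            fun h => absurd h (by decide), fun h => absurd h (by decide)⟩

-- ===== VERDICT (by name: the statement is the Claim_ definition above) =====
theorem is_parsel_tongue_spec : Claim_equal_is_parsel_tongue := by
  intro s _
  unfold Spec_is_parsel_tongue is_parsel_tongue is_parsel_tongue_alt
  rw [splitOn_eq, all_mySplitWords_eq_g]
  simp only [List.reverse_nil, st]
  exact g_eq_altLoop s.toList none 0 ⟨fun _ => Or.inl rfl, by omega, by omega⟩
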